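-- pv_equiv track=rewrite | github.com/ethanortiz25/Wordle-Solver | wordleCalculator.py | widdleMore
-- ===== SOURCE A (Python) =====
-- def widdleMore(validAnswers, validGuesses):
--     letterFreq = {'a': 0, 'b': 0, 'c': 0, 'd': 0, 'e': 0, 'f': 0, 'g': 0, 'h': 0, 'i': 0, 'j': 0, 'k': 0, 'l': 0,
--                   'm': 0, 'n': 0, 'o': 0, 'p': 0, 'q': 0, 'r': 0, 's': 0, 't': 0, 'u': 0, 'v': 0, 'w': 0,
--                   'x': 0, 'y': 0, 'z': 0}
--     for answer in validAnswers:
--         for letter in answer: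
--             letterFreq[letter] += 1
--     least = 13000
--     worst = ''
--     for letter, val in letterFreq.items():
--         if val < least and val != 0:
--             least = val
--             worst = letter
--     ret = []
--     for word in validGuesses:
--         if worst not in word:
--             ret += [word]
--     used = [worst]
--     while len(ret) > 700:
--         least = 13000
--         nworst = ''
--         for letter, val in letterFreq.items():
--             if val < least and val != 0 and letter not in used:
--                 least = val
--                 nworst = letter
--         ret2 = []
--         for word in ret:
--             if nworst not in word:
--                 ret2 += [word]
--         used += [nworst]
--         if len(ret2) == 0:
--             return ret
--         ret = ret2
--     return ret
-- ===== SOURCE B (Python) =====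
-- def widdleMore(validAnswers, validGuesses):
--     # Count letter occurrences once, order the eliminable letters (count in (0, 13000),
--     # A's cap) by (count, letter) in one sort, then a single pass over that order:
--     # keep filtering the guess list until it is <= 700 words or filtering would empty it.
--     freq = {}
--     for answer in validAnswers:
--         for letter in answer:
--             freq[letter] = freq.get(letter, 0) + 1
--     order = [c for v, c in sorted((v, c) for c, v in freq.items() if 0 < v < 13000)]
--     if not order:
--         return []
--     ret = [w for w in validGuesses if order[0] not in w]
--     for c in order[1:]:
--         if len(ret) <= 700:
--             break
--         ret2 = [w for w in ret if c not in w]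
--         if not ret2:
--             break
--         ret = ret2
--     return ret
-- ===== Notes on version B (the rewrite author's own statement) =====
-- stated objective: alternative
-- what changed: A repeatedly rescans the whole 26-entry frequency table (with a growing 'used' exclusion list) to find the next rarest letter before each filtering round; B counts letters once, sorts the eliminable letters by (count, letter) in a single sort, and then just walks that precomputed order, filtering the guess list until it is <=700 words or the next filter would empty it.
import Mathlib
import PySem

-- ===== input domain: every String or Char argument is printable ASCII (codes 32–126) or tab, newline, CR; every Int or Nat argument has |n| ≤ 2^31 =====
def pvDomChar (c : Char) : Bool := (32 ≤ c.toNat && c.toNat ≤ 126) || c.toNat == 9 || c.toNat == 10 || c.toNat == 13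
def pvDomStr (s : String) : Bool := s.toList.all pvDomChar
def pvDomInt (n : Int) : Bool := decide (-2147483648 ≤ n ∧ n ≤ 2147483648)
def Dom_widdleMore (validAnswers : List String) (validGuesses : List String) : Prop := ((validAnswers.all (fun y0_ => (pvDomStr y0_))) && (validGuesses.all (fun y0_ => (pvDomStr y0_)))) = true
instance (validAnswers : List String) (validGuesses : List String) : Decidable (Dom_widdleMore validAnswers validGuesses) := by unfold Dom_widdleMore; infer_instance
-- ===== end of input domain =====

-- B re-implements A's repeated "pick the rarest unused letter by a fresh 26-entry scan"
-- elimination: it counts letters once, sorts the eliminable letters by (count, letter)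
-- in one pass, and then walks that order filtering the guess list (alternative
-- decomposition, same observable results).

-- ===== PORT A =====
-- the dict literal {'a': 0, …, 'z': 0}
def initFreq : PySem.Dict String Int := PySem.Dict.ofList
  [("a",0),("b",0),("c",0),("d",0),("e",0),("f",0),("g",0),("h",0),("i",0),("j",0),("k",0),("l",0),
   ("m",0),("n",0),("o",0),("p",0),("q",0),("r",0),("s",0),("t",0),("u",0),("v",0),("w",0),
   ("x",0),("y",0),("z",0)]

-- the while-body's selection scan: least = 13000; for letter, val in letterFreq.items():
--   if val < least and val != 0 and letter not in used: least, worst = val, letter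
def widdleScan (items : List (String × Int)) (used : List String) : Int × String :=
  items.foldl (fun st p => if p.2 < st.1 ∧ p.2 ≠ 0 ∧ p.1 ∉ used then (p.2, p.1) else st)
    ((13000 : Int), "")

-- the while-loop; fuel = number of dict entries + 1 is always enough: every pass that
-- does not return appends a fresh key to used, and a pass that selects no letter returns
def widdleLoop (fuel : Nat) (items : List (String × Int)) (used : List String)
    (ret : List String) : List String :=
  match fuel with
  | 0 => ret
  | fuel + 1 =>
    if 700 < ret.length then
      let q := widdleScan items used
      let nworst := q.2
      let ret2 := ret.foldl (fun acc word => if ¬ (PySem.Str.isIn nworst word = true) then acc ++ [word] else acc) []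
      let used' := used ++ [nworst]
      if ret2.length = 0 then ret else widdleLoop fuel items used' ret2
    else ret

def widdleMore (validAnswers : List String) (validGuesses : List String) : List String :=
  -- letterFreq[letter] += 1 raises KeyError off 'a'..'z'; Pre_ excludes that, so the
  -- total Dict.modify form is exact
  let freq := validAnswers.foldl
    (fun d answer => answer.toList.foldl (fun d ch => d.modify (String.ofList [ch]) 0 (· + 1)) d)
    initFreq
  -- first selection scan (no 'used' test in the Python)
  let p0 := freq.items.foldl (fun st p => if p.2 < st.1 ∧ p.2 ≠ 0 then (p.2, p.1) else st)
    ((13000 : Int), "")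
  let worst := p0.2
  let ret := validGuesses.foldl (fun acc word => if ¬ (PySem.Str.isIn worst word = true) then acc ++ [word] else acc) []
  widdleLoop (freq.items.length + 1) freq.items [worst] ret

-- ===== PORT B =====
def widdleLoopB (order : List String) (ret : List String) : List String :=
  match order with
  | [] => ret
  | c :: rest =>
    if ret.length ≤ 700 then ret
    else
      let ret2 := ret.filter (fun w => !PySem.Str.isIn c w)
      if ret2.isEmpty then ret else widdleLoopB rest ret2

def widdleMore_alt (validAnswers : List String) (validGuesses : List String) : List String :=
  let freq := validAnswers.foldl
    (fun d answer => answer.toList.foldl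
      (fun d ch => d.insert (String.ofList [ch]) (d.getD (String.ofList [ch]) 0 + 1)) d)
    (PySem.Dict.empty : PySem.Dict String Int)
  let order := (PySem.List.sorted
      ((freq.items.filter (fun p => decide (0 < p.2 ∧ p.2 < 13000))).map (fun p => (p.2, p.1)))
      (fun q => toLex (q.1, q.2.toList))).map (·.2)
  match order with
  | [] => []
  | w0 :: rest => widdleLoopB rest (validGuesses.filter (fun w => !PySem.Str.isIn w0 w))

-- ===== PRECONDITION & SPEC =====
-- Pre_ excludes exactly the inputs where A raises KeyError: an answer containing a
-- character that is not a lowercase ASCII letter (not a key of letterFreq).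
def Pre_widdleMore (validAnswers : List String) (validGuesses : List String) : Prop :=
  (validAnswers.all (fun s => s.toList.all (fun c => decide (c ∈ "abcdefghijklmnopqrstuvwxyz".toList)))) = true
instance (validAnswers : List String) (validGuesses : List String) : Decidable (Pre_widdleMore validAnswers validGuesses) := by unfold Pre_widdleMore; infer_instance

def pvWitness_widdleMore : List String × List String := (["ab"], ["cd"])

def Spec_widdleMore (validAnswers : List String) (validGuesses : List String) (out : List String) : Prop := out = widdleMore_alt validAnswers validGuesses
instance (validAnswers : List String) (validGuesses : List String) (out : List String) : Decidable (Spec_widdleMore validAnswers validGuesses out) := by unfold Spec_widdleMore; infer_instance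

-- ===== CLAIM (what is proved, stated in full; the proofs are below) =====
def Claim_equal_widdleMore : Prop := ∀ (validAnswers : List String) (validGuesses : List String), Dom_widdleMore validAnswers validGuesses → Pre_widdleMore validAnswers validGuesses → Spec_widdleMore validAnswers validGuesses (widdleMore validAnswers validGuesses)


-- ===== LEMMAS AND PROOFS =====

-- proof-side abbreviations
def abcS : List String :=
  ["a","b","c","d","e","f","g","h","i","j","k","l","m",
   "n","o","p","q","r","s","t","u","v","w","x","y","z"]

def Lof (validAnswers : List String) : List String :=
  validAnswers.flatMap (fun s => s.toList.map (fun c => String.ofList [c]))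

def cntI (validAnswers : List String) (k : String) : Int := ((Lof validAnswers).count k : Int)

def itemsA (validAnswers : List String) : List (String × Int) :=
  abcS.map (fun k => (k, cntI validAnswers k))

def TT (validAnswers : List String) : List (Int × String) :=
  PySem.List.sorted
    ((((PySem.Set.ofList (Lof validAnswers)).map (fun k => (k, cntI validAnswers k))).filter
        (fun p => decide (0 < p.2 ∧ p.2 < 13000))).map (fun p => (p.2, p.1)))
    (fun q => toLex (q.1, q.2.toList))

lemma pre_forall {validAnswers validGuesses : List String}
    (hpre : Pre_widdleMore validAnswers validGuesses) :
    ∀ s ∈ validAnswers, ∀ c ∈ s.toList, c ∈ "abcdefghijklmnopqrstuvwxyz".toList := by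
  unfold Pre_widdleMore at hpre
  simpa [List.all_eq_true] using hpre

lemma mem_abcS {c : Char} (h : c ∈ "abcdefghijklmnopqrstuvwxyz".toList) :
    String.ofList [c] ∈ abcS := by
  have he : "abcdefghijklmnopqrstuvwxyz".toList =
      ['a','b','c','d','e','f','g','h','i','j','k','l','m','n','o','p','q','r','s','t','u','v','w','x','y','z'] := rfl
  rw [he] at h
  fin_cases h <;> decide

lemma abcS_nodup : abcS.Nodup := by decide

lemma abcS_pairwise : abcS.Pairwise (fun a b => a.toList < b.toList) := by decide

lemma Lof_subset {validAnswers validGuesses : List String}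
    (hpre : Pre_widdleMore validAnswers validGuesses) :
    ∀ k ∈ Lof validAnswers, k ∈ abcS := by
  intro k hk
  simp only [Lof, List.mem_flatMap, List.mem_map] at hk
  obtain ⟨s, hs, c, hc, rfl⟩ := hk
  exact mem_abcS (pre_forall hpre s hs c hc)

lemma freqA_items {validAnswers validGuesses : List String}
    (hpre : Pre_widdleMore validAnswers validGuesses) :
    (validAnswers.foldl
      (fun d answer => answer.toList.foldl (fun d ch => d.modify (String.ofList [ch]) 0 (· + 1)) d)
      initFreq).items = itemsA validAnswers := by
  have hflat : (validAnswers.foldl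
      (fun d answer => answer.toList.foldl (fun d ch => d.modify (String.ofList [ch]) 0 (· + 1)) d)
      initFreq)
      = (Lof validAnswers).foldl (fun d x => d.modify x 0 (· + 1)) initFreq := by
    rw [Lof, List.foldl_flatMap]
    simp [List.foldl_map]
  rw [hflat]
  have hkeys : ((Lof validAnswers).foldl (fun d x => d.modify x 0 (· + 1)) initFreq).keys
      = abcS := by
    rw [PySem.Dict.keys_foldl_modify (Lof validAnswers) 0 (fun _ _ => (· + 1)) initFreq]
    have hik : initFreq.keys = abcS := by decide
    rw [hik, PySem.Set.update_eq_append_filter]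
    have : List.filter (fun y => !(PySem.Set.contains abcS y)) (PySem.Set.ofList (Lof validAnswers)) = [] := by
      apply List.filter_eq_nil_iff.mpr
      intro y hy
      have hy' : y ∈ Lof validAnswers := (PySem.Set.mem_ofList _ _).mp hy
      simpa using Lof_subset hpre y hy'
    rw [this, List.append_nil]
  have hnd : ((Lof validAnswers).foldl (fun d x => d.modify x 0 (· + 1)) initFreq).keys.Nodup := by
    rw [hkeys]; exact abcS_nodup
  rw [PySem.Dict.items_eq_map_keys _ hnd 0, hkeys]
  apply List.map_congr_left
  intro k hk
  have h0 : initFreq.getD k 0 = 0 := by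
    revert hk
    have : ∀ k ∈ abcS, initFreq.getD k 0 = 0 := by decide
    exact this k
  rw [PySem.Dict.getD_foldl_modify_add_one, h0, zero_add]
  rfl

lemma freqB_items (validAnswers : List String) :
    (validAnswers.foldl
      (fun d answer => answer.toList.foldl
        (fun d ch => d.insert (String.ofList [ch]) (d.getD (String.ofList [ch]) 0 + 1)) d)
      PySem.Dict.empty).items
    = (PySem.Set.ofList (Lof validAnswers)).map (fun k => (k, cntI validAnswers k)) := by
  have hflat : (validAnswers.foldl
      (fun d answer => answer.toList.foldl
        (fun d ch => d.insert (String.ofList [ch]) (d.getD (String.ofList [ch]) 0 + 1)) d)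
      (PySem.Dict.empty : PySem.Dict String Int))
      = (Lof validAnswers).foldl (fun d x => d.insert x (d.getD x 0 + 1)) PySem.Dict.empty := by
    rw [Lof, List.foldl_flatMap]
    simp [List.foldl_map]
  rw [hflat, PySem.Dict.foldl_insert_getD_add_one_eq_counter, PySem.Dict.items_counter]
  rfl

lemma mem_TT {validAnswers validGuesses : List String}
    (hpre : Pre_widdleMore validAnswers validGuesses) (v : Int) (k : String) :
    (v, k) ∈ TT validAnswers ↔
      (k ∈ abcS ∧ v = cntI validAnswers k ∧ v ≠ 0 ∧ v < 13000) := by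
  rw [TT]
  rw [PySem.List.mem_sorted]
  simp only [List.mem_map, List.mem_filter, Prod.mk.injEq, decide_eq_true_eq]
  constructor
  · rintro ⟨p, ⟨⟨k', hk', rfl⟩, h0, h13⟩, rfl, rfl⟩
    have hkL : k' ∈ Lof validAnswers := (PySem.Set.mem_ofList _ _).mp hk'
    exact ⟨Lof_subset hpre k' hkL, rfl, by omega, h13⟩
  · rintro ⟨hkabc, rfl, hne, h13⟩
    refine ⟨(k, cntI validAnswers k), ⟨⟨k, ?_, rfl⟩, ?_, h13⟩, rfl, rfl⟩
    · apply (PySem.Set.mem_ofList _ _).mpr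
      have : 0 < (Lof validAnswers).count k := by
        unfold cntI at hne
        omega
      exact List.count_pos_iff.mp this
    · unfold cntI at hne ⊢
      omega

lemma TT_nodup (validAnswers : List String) : (TT validAnswers).Nodup := by
  rw [TT]
  apply ((PySem.List.sorted_perm _ _ _).nodup_iff).mpr
  apply List.Nodup.map
  · intro p q h
    simp only [Prod.mk.injEq] at h
    exact Prod.ext h.2 h.1
  · apply List.Nodup.filter
    apply List.Nodup.map
    · intro a b h
      simpa using congrArg Prod.fst h
    · exact PySem.Set.nodup_ofList _

lemma TT_pairwise (validAnswers : List String) :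
    (TT validAnswers).Pairwise (fun a b => toLex (a.1, a.2.toList) < toLex (b.1, b.2.toList)) := by
  have hle : (TT validAnswers).Pairwise
      (fun a b => toLex (a.1, a.2.toList) ≤ toLex (b.1, b.2.toList)) := by
    rw [TT]
    exact PySem.List.sorted_pairwise _ _
  have hne : (TT validAnswers).Pairwise (· ≠ ·) := TT_nodup validAnswers
  refine (hle.and hne).imp ?_
  rintro a b ⟨h1, h2⟩
  apply lt_of_le_of_ne h1
  intro he
  apply h2
  have hpair : (a.1, a.2.toList) = (b.1, b.2.toList) := by
    have := congrArg ofLex he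
    simpa using this
  simp only [Prod.mk.injEq] at hpair
  exact Prod.ext hpair.1 (String.toList_inj.mp hpair.2)

lemma TT_snd_nodup (validAnswers : List String) :
    ((TT validAnswers).map (·.2)).Nodup := by
  have hperm : ((TT validAnswers).map (·.2)).Perm
      (((((PySem.Set.ofList (Lof validAnswers)).map (fun k => (k, cntI validAnswers k))).filter
        (fun p => decide (0 < p.2 ∧ p.2 < 13000))).map (fun p => (p.2, p.1))).map (·.2)) := by
    apply List.Perm.map
    rw [TT]
    exact PySem.List.sorted_perm _ _ _
  apply hperm.nodup_iff.mpr
  simp only [List.map_map]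
  have hsub : ((((PySem.Set.ofList (Lof validAnswers)).map (fun k => (k, cntI validAnswers k))).filter
        (fun p => decide (0 < p.2 ∧ p.2 < 13000))).map ((·.2) ∘ (fun p : String × Int => (p.2, p.1)))).Sublist
      (((PySem.Set.ofList (Lof validAnswers)).map (fun k => (k, cntI validAnswers k))).map
        ((·.2) ∘ (fun p : String × Int => (p.2, p.1)))) :=
    List.Sublist.map _ List.filter_sublist
  apply List.Nodup.sublist hsub
  simp only [List.map_map]
  have : ((·.2) ∘ (fun p : String × Int => (p.2, p.1))) ∘ (fun k => (k, cntI validAnswers k)) = id := rfl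
  rw [this, List.map_id]
  exact PySem.Set.nodup_ofList _

lemma mem_filter_notmem {T : List (Int × String)} {used : List String} {x : Int × String}
    (hx : x ∈ T) (hnu : x.2 ∉ used) : x ∈ T.filter (fun q => decide (q.2 ∉ used)) :=
  List.mem_filter.mpr ⟨hx, decide_eq_true hnu⟩

lemma of_mem_filter_notmem {T : List (Int × String)} {used : List String} {x : Int × String}
    (hx : x ∈ T.filter (fun q => decide (q.2 ∉ used))) : x ∈ T ∧ x.2 ∉ used := by
  have h := List.mem_filter.mp hx
  exact ⟨h.1, by simpa using h.2⟩

-- characterization of A's selection scan on a key-sorted items list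
lemma scan_spec (items : List (String × Int)) (used : List String)
    (hsort : items.Pairwise (fun p q => p.1.toList < q.1.toList)) :
    ((∀ q ∈ items, ¬(q.2 ≠ 0 ∧ q.2 < 13000 ∧ q.1 ∉ used)) ∧ widdleScan items used = (13000, ""))
    ∨ ((((widdleScan items used).2, (widdleScan items used).1) ∈ items
        ∧ (widdleScan items used).1 ≠ 0 ∧ (widdleScan items used).1 < 13000
        ∧ (widdleScan items used).2 ∉ used)
       ∧ ∀ q ∈ items, (q.2 ≠ 0 ∧ q.2 < 13000 ∧ q.1 ∉ used) →
          toLex ((widdleScan items used).1, (widdleScan items used).2.toList) ≤ toLex (q.2, q.1.toList)) := by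
  induction items using List.reverseRecOn with
  | nil =>
    left
    refine ⟨by simp, ?_⟩
    simp [widdleScan]
  | append_singleton items p ih =>
    obtain ⟨hs1, -, hlast⟩ := List.pairwise_append.mp hsort
    have hlastp : ∀ a ∈ items, a.1.toList < p.1.toList := by
      intro a ha; exact hlast a ha p (by simp)
    specialize ih hs1
    have hstep : widdleScan (items ++ [p]) used
        = (if p.2 < (widdleScan items used).1 ∧ p.2 ≠ 0 ∧ p.1 ∉ used
           then (p.2, p.1) else widdleScan items used) := by
      simp [widdleScan, List.foldl_append]
    rcases ih with ⟨hnone, heq⟩ | ⟨⟨hmem, hne, hlt13, hnu⟩, hmin⟩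
    · by_cases hp : p.2 ≠ 0 ∧ p.2 < 13000 ∧ p.1 ∉ used
      · right
        have hcond : p.2 < (widdleScan items used).1 ∧ p.2 ≠ 0 ∧ p.1 ∉ used := by
          rw [heq]; exact ⟨hp.2.1, hp.1, hp.2.2⟩
        rw [hstep, if_pos hcond]
        refine ⟨⟨by simp, hp.1, hp.2.1, hp.2.2⟩, ?_⟩
        intro q hq hgood
        rcases List.mem_append.mp hq with hq' | hq'
        · exact absurd hgood (hnone q hq')
        · simp only [List.mem_singleton] at hq'
          subst hq'
          exact le_refl _
      · left
        have hcond : ¬ (p.2 < (widdleScan items used).1 ∧ p.2 ≠ 0 ∧ p.1 ∉ used) := by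
          rw [heq]
          intro ⟨h1, h2, h3⟩
          exact hp ⟨h2, h1, h3⟩
        refine ⟨?_, by rw [hstep, if_neg hcond]; exact heq⟩
        intro q hq
        rcases List.mem_append.mp hq with hq' | hq'
        · exact hnone q hq'
        · simp only [List.mem_singleton] at hq'
          subst hq'
          exact hp
    · by_cases hcond : p.2 < (widdleScan items used).1 ∧ p.2 ≠ 0 ∧ p.1 ∉ used
      · right
        rw [hstep, if_pos hcond]
        refine ⟨⟨by simp, hcond.2.1, lt_trans hcond.1 hlt13, hcond.2.2⟩, ?_⟩
        intro q hq hgood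
        rcases List.mem_append.mp hq with hq' | hq'
        · have h1 : toLex ((widdleScan items used).1, (widdleScan items used).2.toList)
              ≤ toLex (q.2, q.1.toList) := hmin q hq' hgood
          have h2 : (widdleScan items used).1 ≤ q.2 := by
            rcases Prod.Lex.toLex_le_toLex.mp h1 with h | h
            · exact le_of_lt h
            · exact le_of_eq h.1
          exact Prod.Lex.toLex_le_toLex.mpr (Or.inl (lt_of_lt_of_le hcond.1 h2))
        · simp only [List.mem_singleton] at hq'
          subst hq'
          exact le_refl _
      · right
        rw [hstep, if_neg hcond]
        refine ⟨⟨List.mem_append.mpr (Or.inl hmem), hne, hlt13, hnu⟩, ?_⟩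
        intro q hq hgood
        rcases List.mem_append.mp hq with hq' | hq'
        · exact hmin q hq' hgood
        · simp only [List.mem_singleton] at hq'
          subst hq'
          have hge : (widdleScan items used).1 ≤ q.2 := by
            by_contra hlt
            push Not at hlt
            exact hcond ⟨hlt, hgood.1, hgood.2.2⟩
          rcases lt_or_eq_of_le hge with h | h
          · exact Prod.Lex.toLex_le_toLex.mpr (Or.inl h)
          · refine Prod.Lex.toLex_le_toLex.mpr (Or.inr ⟨h, ?_⟩)
            exact le_of_lt (hlastp _ hmem)

lemma scan_prelim {validAnswers validGuesses : List String}
    (hpre : Pre_widdleMore validAnswers validGuesses) (used : List String) :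
    ∀ (k : String) (v : Int),
      ((k, v) ∈ itemsA validAnswers ∧ v ≠ 0 ∧ v < 13000 ∧ k ∉ used)
        ↔ ((v, k) ∈ TT validAnswers ∧ k ∉ used) := by
  intro k v
  rw [mem_TT hpre]
  constructor
  · rintro ⟨hq, h1, h2, h3⟩
    simp only [itemsA, List.mem_map, Prod.mk.injEq] at hq
    obtain ⟨k', hk', rfl, rfl⟩ := hq
    exact ⟨⟨hk', rfl, h1, h2⟩, h3⟩
  · rintro ⟨⟨hk, hv, h1, h2⟩, h3⟩
    refine ⟨?_, h1, h2, h3⟩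
    simp only [itemsA, List.mem_map, Prod.mk.injEq]
    exact ⟨k, hk, rfl, hv.symm⟩

lemma itemsA_sorted (validAnswers : List String) :
    (itemsA validAnswers).Pairwise (fun p q => p.1.toList < q.1.toList) := by
  rw [itemsA]
  exact List.pairwise_map.mpr abcS_pairwise

lemma scan_eq_none {validAnswers validGuesses : List String}
    (hpre : Pre_widdleMore validAnswers validGuesses) (used : List String)
    (hF : (TT validAnswers).filter (fun q => decide (q.2 ∉ used)) = []) :
    widdleScan (itemsA validAnswers) used = (13000, "") := by
  have hitems := scan_prelim hpre used
  have hspec := scan_spec (itemsA validAnswers) used (itemsA_sorted validAnswers)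
  rcases hsc : widdleScan (itemsA validAnswers) used with ⟨l, w⟩
  rw [hsc] at hspec
  simp only at hspec
  rcases hspec with ⟨-, heq⟩ | ⟨⟨hmem, hne, hlt13, hnu⟩, -⟩
  · exact heq
  · exfalso
    have hTTm : (l, w) ∈ TT validAnswers := ((hitems w l).mp ⟨hmem, hne, hlt13, hnu⟩).1
    have hin := mem_filter_notmem hTTm hnu
    rw [hF] at hin
    exact absurd hin (List.not_mem_nil)

lemma scan_eq_cons {validAnswers validGuesses : List String}
    (hpre : Pre_widdleMore validAnswers validGuesses) (used : List String)
    (q : Int × String) (t : List (Int × String))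
    (hF : (TT validAnswers).filter (fun r => decide (r.2 ∉ used)) = q :: t) :
    widdleScan (itemsA validAnswers) used = (q.1, q.2) := by
  have hitems := scan_prelim hpre used
  have hqF : q ∈ (TT validAnswers).filter (fun r => decide (r.2 ∉ used)) := by
    rw [hF]; exact List.mem_cons_self
  obtain ⟨hqTT, hqu'⟩ := of_mem_filter_notmem hqF
  have hq' : ((q.2, q.1) : String × Int) ∈ itemsA validAnswers ∧
      q.1 ≠ 0 ∧ q.1 < 13000 ∧ q.2 ∉ used := by
    apply (hitems q.2 q.1).mpr
    exact ⟨by rw [Prod.mk.eta]; exact hqTT, hqu'⟩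
  have hspec := scan_spec (itemsA validAnswers) used (itemsA_sorted validAnswers)
  rcases hsc : widdleScan (itemsA validAnswers) used with ⟨l, w⟩
  rw [hsc] at hspec
  simp only at hspec
  rcases hspec with ⟨hnone, -⟩ | ⟨⟨hmem, hne, hlt13, hnu⟩, hmin⟩
  · exact absurd hq'.2 (hnone (q.2, q.1) hq'.1)
  · have hle : toLex (l, w.toList) ≤ toLex (q.1, q.2.toList) := by
      have := hmin (q.2, q.1) hq'.1 ⟨hq'.2.1, hq'.2.2⟩
      simpa using this
    have hTTm : (l, w) ∈ TT validAnswers := ((hitems w l).mp ⟨hmem, hne, hlt13, hnu⟩).1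
    have hin := mem_filter_notmem hTTm hnu
    rw [hF] at hin
    rcases List.mem_cons.mp hin with hin' | hin'
    · rw [← hin']
    · exfalso
      have hpairF : ((TT validAnswers).filter (fun r => decide (r.2 ∉ used))).Pairwise
          (fun a b => toLex (a.1, a.2.toList) < toLex (b.1, b.2.toList)) :=
        (TT_pairwise validAnswers).filter _
      rw [hF] at hpairF
      have hlt := (List.pairwise_cons.mp hpairF).1 _ hin'
      exact absurd hle (not_le_of_gt hlt)

lemma filter_not_mem_take {T1 T2 : List (Int × String)}
    (hnd : ((T1 ++ T2).map (·.2)).Nodup) :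
    (T1 ++ T2).filter (fun q => decide (q.2 ∉ T1.map (·.2))) = T2 := by
  rw [List.filter_append]
  rw [List.map_append] at hnd
  have hd := (List.nodup_append.mp hnd).2.2
  have h1 : T1.filter (fun q => decide (q.2 ∉ T1.map (·.2))) = [] := by
    apply List.filter_eq_nil_iff.mpr
    intro q hq
    simp only [decide_eq_true_eq, Decidable.not_not]
    exact List.mem_map_of_mem hq
  have h2 : T2.filter (fun q => decide (q.2 ∉ T1.map (·.2))) = T2 := by
    apply List.filter_eq_self.mpr
    intro q hq
    simp only [decide_eq_true_eq]
    intro hmem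
    exact false_of_ne (hd q.2 hmem q.2 (List.mem_map_of_mem hq))
  rw [h1, h2, List.nil_append]

lemma foldl_filter_bridge (w : String) (ret : List String) :
    ret.foldl (fun acc word => if ¬ (PySem.Str.isIn w word = true) then acc ++ [word] else acc) []
      = ret.filter (fun word => !PySem.Str.isIn w word) := by
  rw [PySem.List.foldl_append_ite_eq_filter (fun word => ¬ (PySem.Str.isIn w word = true)) ret []]
  simp

lemma sim {validAnswers validGuesses : List String}
    (hpre : Pre_widdleMore validAnswers validGuesses) :
    ∀ (T2 T1 : List (Int × String)) (ret : List String) (fuel : Nat),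
      TT validAnswers = T1 ++ T2 → T2.length + 1 ≤ fuel →
      widdleLoop fuel (itemsA validAnswers) (T1.map (·.2)) ret
        = widdleLoopB (T2.map (·.2)) ret := by
  intro T2
  induction T2 with
  | nil =>
    intro T1 ret fuel hT hfuel
    cases fuel with
    | zero => exact absurd hfuel (by omega)
    | succ f =>
      simp only [widdleLoop, widdleLoopB, List.map_nil]
      by_cases h700 : 700 < ret.length
      · rw [if_pos h700]
        have hFn : (TT validAnswers).filter (fun q => decide (q.2 ∉ T1.map (·.2))) = [] := by
          rw [hT]
          have hnd : ((T1 ++ ([] : List (Int × String))).map (·.2)).Nodup := by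
            rw [← hT]; exact TT_snd_nodup validAnswers
          simpa using filter_not_mem_take hnd
        have hscan := scan_eq_none (validGuesses := validGuesses) hpre (T1.map (·.2)) hFn
        simp only [hscan]
        rw [foldl_filter_bridge]
        simp
      · rw [if_neg h700]
  | cons p T2' ih =>
    intro T1 ret fuel hT hfuel
    cases fuel with
    | zero => exact absurd hfuel (by omega)
    | succ f =>
      simp only [widdleLoop, widdleLoopB, List.map_cons]
      by_cases h700 : 700 < ret.length
      · rw [if_pos h700, if_neg (by omega : ¬ ret.length ≤ 700)]
        have hnd : ((T1 ++ p :: T2').map (·.2)).Nodup := by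
          rw [← hT]; exact TT_snd_nodup validAnswers
        have hFn : (TT validAnswers).filter (fun q => decide (q.2 ∉ T1.map (·.2)))
            = p :: T2' := by
          rw [hT]
          exact filter_not_mem_take hnd
        have hscan := scan_eq_cons (validGuesses := validGuesses) hpre (T1.map (·.2)) p T2' hFn
        simp only [hscan]
        rw [foldl_filter_bridge]
        by_cases hemp : (ret.filter (fun w => !PySem.Str.isIn p.2 w)).length = 0
        · rw [if_pos hemp]
          have : (ret.filter (fun w => !PySem.Str.isIn p.2 w)).isEmpty = true := by
            rw [List.isEmpty_iff_length_eq_zero]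
            exact hemp
          rw [if_pos this]
        · rw [if_neg hemp]
          have : ¬ (ret.filter (fun w => !PySem.Str.isIn p.2 w)).isEmpty = true := by
            rw [List.isEmpty_iff_length_eq_zero]
            exact hemp
          rw [if_neg this]
          have hused : (T1.map (·.2)) ++ [p.2] = ((T1 ++ [p]).map (·.2)) := by
            simp
          rw [hused]
          apply ih (T1 ++ [p])
          · rw [hT, List.append_assoc]; rfl
          · simp only [List.length_cons] at hfuel
            omega
      · rw [if_neg h700, if_pos (by omega : ret.length ≤ 700)]

lemma nodup_length_le {l1 l2 : List String} (h : l1.Nodup) (hs : ∀ x ∈ l1, x ∈ l2) :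
    l1.length ≤ l2.length := by
  classical
  calc l1.length = l1.toFinset.card := (List.toFinset_card_of_nodup h).symm
    _ ≤ l2.toFinset.card := Finset.card_le_card (by intro x hx; simp at hx ⊢; exact hs x hx)
    _ ≤ l2.length := List.toFinset_card_le l2

lemma TT_length_le {validAnswers validGuesses : List String}
    (hpre : Pre_widdleMore validAnswers validGuesses) : (TT validAnswers).length ≤ 26 := by
  have hnd := TT_snd_nodup validAnswers
  have hsub : ∀ x ∈ (TT validAnswers).map (·.2), x ∈ abcS := by
    intro x hx
    obtain ⟨q, hq, rfl⟩ := List.mem_map.mp hx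
    exact ((mem_TT hpre q.1 q.2).mp (by rw [Prod.mk.eta]; exact hq)).1
  have h1 := nodup_length_le hnd hsub
  simpa using h1

-- ===== VERDICT (by name: the statement is the Claim_ definition above) =====
theorem widdleMore_spec : Claim_equal_widdleMore := by
  intro validAnswers validGuesses hdom hpre
  unfold Spec_widdleMore
  show widdleMore validAnswers validGuesses = widdleMore_alt validAnswers validGuesses
  rw [widdleMore, widdleMore_alt]
  simp only [freqA_items hpre, freqB_items validAnswers]
  have hTTdef : PySem.List.sorted
      ((((PySem.Set.ofList (Lof validAnswers)).map (fun k => (k, cntI validAnswers k))).filter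
        (fun p => decide (0 < p.2 ∧ p.2 < 13000))).map (fun p => (p.2, p.1)))
      (fun q => toLex (q.1, q.2.toList)) = TT validAnswers := rfl
  rw [hTTdef]
  have hscan0 : (itemsA validAnswers).foldl
      (fun st p => if p.2 < st.1 ∧ p.2 ≠ 0 then (p.2, p.1) else st) ((13000 : Int), "")
      = widdleScan (itemsA validAnswers) ([] : List String) := by
    rw [widdleScan]
    apply PySem.List.foldl_congr_mem
    intro acc x _
    simp
  rw [hscan0]
  cases hTT : TT validAnswers with
  | nil =>
    have hFn : (TT validAnswers).filter (fun q => decide (q.2 ∉ ([] : List String))) = [] := by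
      rw [hTT]; rfl
    have hscan := scan_eq_none (validGuesses := validGuesses) hpre [] hFn
    rw [hscan, foldl_filter_bridge]
    simp only [List.map_nil]
    have hret : validGuesses.filter (fun word => !PySem.Str.isIn ((13000 : Int), "").2 word)
        = [] := by
      apply List.filter_eq_nil_iff.mpr
      intro w _
      simp
    rw [hret]
    simp [widdleLoop]
  | cons t0 T2 =>
    have hFn : (TT validAnswers).filter (fun q => decide (q.2 ∉ ([] : List String))) = t0 :: T2 := by
      rw [hTT]
      apply List.filter_eq_self.mpr
      intro q _
      simp
    have hscan := scan_eq_cons (validGuesses := validGuesses) hpre [] t0 T2 hFn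
    rw [hscan, foldl_filter_bridge]
    simp only [List.map_cons]
    have hused : [((t0.1, t0.2) : Int × String).2] = ([t0].map (·.2)) := by simp
    rw [hused]
    have hT : TT validAnswers = [t0] ++ T2 := by rw [hTT]; rfl
    have hlen := TT_length_le (validGuesses := validGuesses) hpre
    rw [hTT] at hlen
    simp only [List.length_cons] at hlen
    have hfuel : T2.length + 1 ≤ (itemsA validAnswers).length + 1 := by
      have : (itemsA validAnswers).length = 26 := by rw [itemsA]; simp [abcS]
      omega
    exact sim hpre T2 [t0] _ _ hT hfuel
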